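-- pv_equiv track=rewrite | github.com/edder773/Algorithm | Python/SWEA/고대 유적.py | check
-- ===== SOURCE A (Python) =====
-- def check(n):
--     cnt_max = 0
--     for i in n:
--         cnt = 0
--         for j in i:
--             if j == 1: # 1이면
--                 cnt += 1 # 갯수 증가
--                 if cnt_max < cnt: # 최대값 구하기
--                     cnt_max = cnt
--             else :
--                 cnt = 0
--     return cnt_max # 최대값 반환
-- ===== SOURCE B (Python) =====
-- def check(n):
--     best = 0
--     for row in n:
--         i = 0
--         L = len(row)
--         while i < L:
--             j = i + 1
--             while j < L and row[j] == row[i]: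
--                 j += 1
--             if row[i] == 1 and j - i > best:
--                 best = j - i
--             i = j
--     return best
-- ===== Notes on version B (the rewrite author's own statement) =====
-- stated objective: alternative
-- what changed: Replaces A's running counter-with-reset (cnt/cnt_max updated per element) by run segmentation: a two-pointer scan splits each row into maximal runs of equal values and compares the length of each run of 1s against the best.
import Mathlib
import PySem

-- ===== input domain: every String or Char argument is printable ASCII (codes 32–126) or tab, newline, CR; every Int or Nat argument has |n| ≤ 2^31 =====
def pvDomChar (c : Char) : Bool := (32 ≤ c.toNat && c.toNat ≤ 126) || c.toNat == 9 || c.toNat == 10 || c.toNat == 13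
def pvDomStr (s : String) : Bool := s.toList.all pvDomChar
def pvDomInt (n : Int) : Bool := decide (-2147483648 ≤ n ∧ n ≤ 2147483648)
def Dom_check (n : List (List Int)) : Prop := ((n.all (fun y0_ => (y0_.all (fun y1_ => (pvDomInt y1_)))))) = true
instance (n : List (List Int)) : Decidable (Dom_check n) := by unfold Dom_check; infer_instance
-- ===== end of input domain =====

-- B replaces A's element-wise counter-with-reset by a two-pointer run-segmentation scan (alternative decomposition, same cost).

-- ===== PORT A =====
-- inner-loop body of A: state (cnt, cnt_max)
def stepA (p : Int × Int) (j : Int) : Int × Int :=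
  if j = 1 then
    let c := p.1 + 1
    (c, if p.2 < c then c else p.2)
  else (0, p.2)

def check (n : List (List Int)) : Int :=
  n.foldl (fun cntMax row => (row.foldl stepA (0, cntMax)).2) 0

-- ===== PORT B =====
-- one row of B: the inner `while j < L and row[j] == row[i]` scan is the maximal run at the
-- front (takeWhile); its length is compared against best when it is a run of 1s, and the
-- scan resumes right after the run (dropWhile)
def rowBest : List Int → Int → Int
  | [], best => best
  | x :: xs, best =>
    rowBest (xs.dropWhile (fun y => y == x))
      (if x = 1 ∧ 1 + ((xs.takeWhile (fun y => y == x)).length : Int) > best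
       then 1 + ((xs.takeWhile (fun y => y == x)).length : Int) else best)
termination_by l _ => l.length
decreasing_by
  simpa using Nat.lt_succ_of_le (List.length_dropWhile_le _ _)

def check_alt (n : List (List Int)) : Int :=
  n.foldl (fun best row => rowBest row best) 0

-- ===== PRECONDITION & SPEC =====
def Spec_check (n : List (List Int)) (out : Int) : Prop := out = check_alt n
instance (n : List (List Int)) (out : Int) : Decidable (Spec_check n out) := by unfold Spec_check; infer_instance

-- ===== CLAIM (what is proved, stated in full; the proofs are below) =====
def Claim_equal_check : Prop := ∀ (n : List (List Int)), Dom_check n → Spec_check n (check n)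

-- ===== LEMMAS AND PROOFS =====

-- a run of 1s advances cnt by its length and records the max
lemma ones_run (t : List Int) (ht : ∀ y ∈ t, y = 1) (c m : Int) :
    t.foldl stepA (c, m) = (c + t.length, if t.length = 0 then m else max m (c + t.length)) := by
  induction t generalizing c m with
  | nil => simp
  | cons a t ih =>
    have ha : a = 1 := ht a (List.mem_cons_self ..)
    have ht' : ∀ y ∈ t, y = 1 := fun y hy => ht y (List.mem_cons_of_mem _ hy)
    have hstep : stepA (c, m) a = (c + 1, max m (c + 1)) := by
      subst ha
      simp [stepA, Prod.ext_iff]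
      omega
    rw [List.foldl_cons, hstep, ih ht']
    rw [Prod.ext_iff]
    constructor
    · simp only [List.length_cons]; push_cast; ring
    · simp only [List.length_cons]; split_ifs <;> push_cast at * <;> omega

-- a run with no 1s resets cnt and leaves cnt_max alone
lemma nonones_run (t : List Int) (ht : ∀ y ∈ t, y ≠ 1) (c m : Int) :
    t.foldl stepA (c, m) = ((if t.isEmpty then c else 0), m) := by
  induction t generalizing c with
  | nil => simp
  | cons a t ih =>
    have ha : a ≠ 1 := ht a (List.mem_cons_self ..)
    have ht' : ∀ y ∈ t, y ≠ 1 := fun y hy => ht y (List.mem_cons_of_mem _ hy)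
    simp only [List.foldl_cons, stepA, if_neg ha]
    rw [ih ht']
    cases t <;> simp

-- per-row equality: A's counter pass equals B's run-segmentation pass
lemma main_row (row : List Int) (m : Int) :
    (row.foldl stepA (0, m)).2 = rowBest row m := by
  induction row, m using rowBest.induct with
  | case1 best => simp [rowBest]
  | case2 x xs best ih =>
    set run := xs.takeWhile (fun y => y == x) with hrun
    set d := xs.dropWhile (fun y => y == x) with hd
    have hxs : run ++ d = xs := List.takeWhile_append_dropWhile
    have hrunmem : ∀ y ∈ run, y = x := fun y hy => by
      simpa using List.mem_takeWhile_imp hy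
    simp only [dite_eq_ite] at ih
    rw [rowBest, List.foldl_cons, ← hrun, ← hd]
    conv_lhs => rw [← hxs, List.foldl_append]
    by_cases hx : x = 1
    · subst hx
      have hstep : stepA (0, best) 1 = (1, max best 1) := by
        simp [stepA, Prod.ext_iff]
        omega
      have hb' : (if (1 : Int) = 1 ∧ 1 + (run.length : Int) > best
            then 1 + (run.length : Int) else best)
          = (if run.length = 0 then max best 1 else max (max best 1) (1 + (run.length : Int))) := by
        simp only [true_and]
        split_ifs <;> push_cast at * <;> omega
      rw [hstep, ones_run run hrunmem 1 (max best 1), ← hb']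
      cases hcd : d with
      | nil => simp [rowBest]
      | cons y ys =>
        have hne : xs.dropWhile (fun y => y == (1 : Int)) ≠ [] := by rw [← hd, hcd]; simp
        have hy := List.head_dropWhile_not (l := xs) (p := fun y => y == (1 : Int)) hne
        simp only [← hd, hcd, List.head_cons] at hy
        have hy1 : y ≠ 1 := by simpa using hy
        have h1 : stepA (1 + (run.length : Int), if (1 : Int) = 1 ∧ 1 + (run.length : Int) > best
            then 1 + (run.length : Int) else best) y
            = (0, if (1 : Int) = 1 ∧ 1 + (run.length : Int) > best
                  then 1 + (run.length : Int) else best) := by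
          simp [stepA, hy1]
        have h2 : stepA (0, if (1 : Int) = 1 ∧ 1 + (run.length : Int) > best
            then 1 + (run.length : Int) else best) y
            = (0, if (1 : Int) = 1 ∧ 1 + (run.length : Int) > best
                  then 1 + (run.length : Int) else best) := by
          simp [stepA, hy1]
        rw [List.foldl_cons, h1]
        rw [hcd, List.foldl_cons, h2] at ih
        exact ih
    · have hrun1 : ∀ y ∈ run, y ≠ 1 := fun y hy => (hrunmem y hy) ▸ hx
      have hstep : stepA (0, best) x = (0, best) := by simp [stepA, hx]
      have hb' : (if x = 1 ∧ 1 + (run.length : Int) > best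
            then 1 + (run.length : Int) else best) = best := by
        simp [hx]
      have hz : ((if run.isEmpty then (0 : Int) else 0), best) = ((0 : Int), best) := by
        split <;> rfl
      rw [hstep, nonones_run run hrun1 0 best, hz, hb']
      rw [hb'] at ih
      exact ih

lemma outer (n : List (List Int)) (m : Int) :
    n.foldl (fun cntMax row => (row.foldl stepA (0, cntMax)).2) m
      = n.foldl (fun best row => rowBest row best) m := by
  have h : (fun (cntMax : Int) (row : List Int) => (row.foldl stepA (0, cntMax)).2)
      = fun best row => rowBest row best := by
    funext m row; exact main_row row m
  rw [h]

-- ===== VERDICT (by name: the statement is the Claim_ definition above) =====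
theorem check_spec : Claim_equal_check := by
  intro n _
  unfold Spec_check check check_alt
  exact outer n 0
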